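-- pv_equiv track=rewrite | github.com/JackWardLT/SanBot-Application-Importer | tempCodeRunnerFile.py | parsePathName
-- ===== SOURCE A (Python) =====
-- def parsePathName(path):
--     if not path:
--         return "none"
--
--     status = True
--     charToName = []
--     reverseString = path[::-1]
--
--     for char in reverseString:
--         if char == "\\" or char == "/":
--             break
--         charToName.append(char)
--
--     if len(charToName) > 15:
--         fix = ''.join(charToName[::-1])
--         return ''.join(fix) + "..."
--
--     return ''.join(charToName[::-1])
-- ===== SOURCE B (Python) =====
-- def parsePathName(path):
--     if not path:
--         return "none"
--     name = path.replace("\\", "/").rsplit("/", 1)[-1]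
--     if len(name) > 15:
--         return name + "..."
--     return name
-- ===== Notes on version B (the rewrite author's own statement) =====
-- stated objective: idiomatic
-- what changed: Replaces A's reverse-the-string, char-by-char backward scan with break and double list reversal by library calls: normalize separators with replace('\\','/') and take the last path component with rsplit('/',1)[-1].
import Mathlib
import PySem

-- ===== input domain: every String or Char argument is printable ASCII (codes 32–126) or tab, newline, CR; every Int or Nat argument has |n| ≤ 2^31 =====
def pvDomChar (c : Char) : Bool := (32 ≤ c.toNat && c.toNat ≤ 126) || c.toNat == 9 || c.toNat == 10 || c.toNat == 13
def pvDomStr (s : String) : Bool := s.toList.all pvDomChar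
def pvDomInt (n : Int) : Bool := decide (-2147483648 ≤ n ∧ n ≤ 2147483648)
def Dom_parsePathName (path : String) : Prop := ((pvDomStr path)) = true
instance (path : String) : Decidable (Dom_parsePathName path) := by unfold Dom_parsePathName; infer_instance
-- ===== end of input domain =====

-- B replaces A's manual reverse-then-backward-scan-with-break and double reversal by library calls: normalize '\' to '/' and take the last '/'-separated component (idiomatic; same cost).


-- ===== PORT A =====
-- the 'for char in reverseString: if sep: break; append' loop, building charToName in order
def parseALoop : List Char → List Char
  | [] => []
  | c :: cs => if c = '\\' ∨ c = '/' then [] else c :: parseALoop cs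

def parsePathName (path : String) : String :=
  if path = "" then "none"               -- if not path
  else
    let reverseString := path.toList.reverse    -- path[::-1]
    let charToName := parseALoop reverseString
    if charToName.length > 15 then
      String.ofList (charToName.reverse ++ "...".toList)   -- ''.join(''.join(charToName[::-1])) + "..."
    else
      String.ofList charToName.reverse          -- ''.join(charToName[::-1])

-- ===== PORT B =====
-- Source B: name = path.replace("\\", "/").rsplit("/", 1)[-1]
-- replace → map; rsplit("/",1)[-1] (the text after the last '/') → splitOn '/' then last element
def parsePathName_alt (path : String) : String :=
  if path = "" then "none"
  else
    let name := ((path.toList.map (fun c => if c = '\\' then '/' else c)).splitOn '/').getLastD []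
    if name.length > 15 then String.ofList (name ++ "...".toList)
    else String.ofList name

-- ===== PRECONDITION & SPEC =====
def Spec_parsePathName (path : String) (out : String) : Prop := out = parsePathName_alt path
instance (path : String) (out : String) : Decidable (Spec_parsePathName path out) := by unfold Spec_parsePathName; infer_instance

-- ===== CLAIM (what is proved, stated in full; the proofs are below) =====
def Claim_equal_parsePathName : Prop := ∀ (path : String), Dom_parsePathName path → Spec_parsePathName path (parsePathName path)

-- ===== LEMMAS AND PROOFS =====
-- A's loop is takeWhile over non-separators
lemma parseALoop_eq_takeWhile (l : List Char) :
    parseALoop l = l.takeWhile (fun c => !(c == '\\' || c == '/')) := by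
  induction l with
  | nil => rfl
  | cons c cs ih =>
      by_cases h : c = '\\' ∨ c = '/'
      · rcases h with h | h <;> simp [parseALoop, h, List.takeWhile_cons]
      · push_neg at h
        simp [parseALoop, h.1, h.2, List.takeWhile_cons, ih]

-- a list containing a p-element splits into ≥ 2 pieces
lemma splitOnP_two_le {α : Type} (p : α → Bool) (m : List α) (x : α)
    (hx : x ∈ m) (hp : p x = true) : 2 ≤ (m.splitOnP p).length := by
  induction m with
  | nil => cases hx
  | cons a as ih =>
      rw [List.splitOnP_cons]
      by_cases ha : p a = true
      · have hne := List.splitOnP_ne_nil p as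
        have h1 : 1 ≤ (as.splitOnP p).length := by
          cases h : as.splitOnP p with
          | nil => exact absurd h hne
          | cons _ _ => simp
        simp only [ha, if_true, List.length_cons]; omega
      · rcases List.mem_cons.mp hx with rfl | hx'
        · exact absurd hp ha
        · have := ih hx'
          simpa [ha, List.length_modifyHead] using this

lemma getLastD_modifyHead {α : Type} (f : α → α) (l : List α) (d : α) (h : 2 ≤ l.length) :
    (l.modifyHead f).getLastD d = l.getLastD d := by
  match l, h with
  | a :: b :: t, _ => simp [List.modifyHead, List.getLastD_cons]

lemma takeWhile_length_eq_iff {α : Type} (q : α → Bool) (l : List α) :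
    (l.takeWhile q).length = l.length ↔ ∀ x ∈ l, q x = true := by
  constructor
  · intro h
    exact List.takeWhile_eq_self_iff.mp ((List.takeWhile_prefix q).eq_of_length h)
  · intro h
    rw [List.takeWhile_eq_self_iff.mpr h]

-- last piece of splitOnP = reversed takeWhile of the reverse
lemma splitOnP_getLastD (p : Char → Bool) (m : List Char) :
    ((m.splitOnP p).getLastD []) = (m.reverse.takeWhile (fun c => !(p c))).reverse := by
  induction m with
  | nil => simp
  | cons c cs ih =>
      rw [List.splitOnP_cons]
      by_cases hmem : ∃ x ∈ cs, p x = true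
      · obtain ⟨x, hx, hpx⟩ := hmem
        have hlen : ¬ ((cs.reverse.takeWhile (fun c => !(p c))).length = cs.reverse.length) := by
          intro h
          have := (takeWhile_length_eq_iff _ _).mp h x (List.mem_reverse.mpr hx)
          simp [hpx] at this
        have htw : (cs.reverse ++ [c]).takeWhile (fun c => !(p c)) =
            cs.reverse.takeWhile (fun c => !(p c)) := by
          rw [List.takeWhile_append, if_neg hlen]
        by_cases hc : p c = true
        · simp only [hc, if_true, List.getLastD_cons, List.reverse_cons, htw, ih]
        · simp only [hc, Bool.false_eq_true, if_false]
          rw [getLastD_modifyHead _ _ _ (splitOnP_two_le p cs x hx hpx)]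
          simp only [List.reverse_cons, htw, ih]
      · push_neg at hmem
        have hall : ∀ x ∈ cs.reverse, (!(p x)) = true := by
          intro x hx; simp [hmem x (List.mem_reverse.mp hx)]
        have hsingle : cs.splitOnP p = [cs] :=
          List.splitOnP_eq_single p cs (fun x hx h => by have := hmem x hx; simp_all)
        have htw : (cs.reverse ++ [c]).takeWhile (fun c => !(p c)) =
            cs.reverse ++ [c].takeWhile (fun c => !(p c)) := by
          rw [List.takeWhile_append,
            if_pos ((takeWhile_length_eq_iff _ _).mpr hall)]
        by_cases hc : p c = true
        · simp [hc, hsingle, htw, List.takeWhile_cons]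
        · simp [hc, hsingle, htw, List.takeWhile_cons]

-- the normalization map turns "is '\' or '/'" into "is '/'", and is identity on non-separators
lemma takeWhile_map_norm (l : List Char) :
    (l.map (fun c => if c = '\\' then '/' else c)).takeWhile (fun c => !(c == '/')) =
    l.takeWhile (fun c => !(c == '\\' || c == '/')) := by
  induction l with
  | nil => rfl
  | cons c cs ih =>
      by_cases h1 : c = '\\'
      · simp [h1, List.takeWhile_cons]
      · by_cases h2 : c = '/'
        · simp [h2, List.takeWhile_cons]
        · simp [h1, h2, List.takeWhile_cons, ih]

lemma name_eq (l : List Char) :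
    (((l.map (fun c => if c = '\\' then '/' else c)).splitOn '/').getLastD []) =
    (parseALoop l.reverse).reverse := by
  rw [List.splitOn, splitOnP_getLastD, parseALoop_eq_takeWhile, ← List.map_reverse,
    takeWhile_map_norm]

-- ===== VERDICT (by name: the statement is the Claim_ definition above) =====
theorem parsePathName_spec : Claim_equal_parsePathName := by
  intro path _
  unfold Spec_parsePathName parsePathName parsePathName_alt
  by_cases h : path = ""
  · simp [h]
  · simp only [h, ite_false]
    rw [name_eq path.toList]
    simp [List.length_reverse]
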